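-- pv_equiv track=rewrite | github.com/Poyso/uni | primo-anno/primo-semestre/programmazione-1/testpy/4.py | disenga_linea
-- ===== SOURCE A (Python) =====
-- P = [2, 0, 6, 9, 7, 3]
--
-- def disenga_linea(p, N, c):
--     linea = ""
--     for x in range(min(p), max(p)+1):
--         if x in P:
--             i = P.index(x)
--             nome = N[i]
--             if nome in c:
--                 linea += '*'
--             else:
--                 linea += "+"
--         else:
--             linea += " "
--     return linea
-- ===== SOURCE B (Python) =====
-- P = [2, 0, 6, 9, 7, 3]
--
-- def disenga_linea(p, N, c):
--     lo, hi = min(p), max(p)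
--     buf = [' '] * (hi - lo + 1)
--     for i, v in enumerate(P):
--         if lo <= v <= hi:
--             buf[v - lo] = '*' if N[i] in c else '+'
--     return ''.join(buf)
-- ===== Notes on version B (the rewrite author's own statement) =====
-- stated objective: faster
-- what changed: B scatters marks from the fixed 6-element list P into a pre-allocated space buffer (one pass over P after computing min/max) and joins it, instead of A's gather loop over every position of the inclusive range with a membership test and index scan of P plus a string concatenation per position.
import Mathlib
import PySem

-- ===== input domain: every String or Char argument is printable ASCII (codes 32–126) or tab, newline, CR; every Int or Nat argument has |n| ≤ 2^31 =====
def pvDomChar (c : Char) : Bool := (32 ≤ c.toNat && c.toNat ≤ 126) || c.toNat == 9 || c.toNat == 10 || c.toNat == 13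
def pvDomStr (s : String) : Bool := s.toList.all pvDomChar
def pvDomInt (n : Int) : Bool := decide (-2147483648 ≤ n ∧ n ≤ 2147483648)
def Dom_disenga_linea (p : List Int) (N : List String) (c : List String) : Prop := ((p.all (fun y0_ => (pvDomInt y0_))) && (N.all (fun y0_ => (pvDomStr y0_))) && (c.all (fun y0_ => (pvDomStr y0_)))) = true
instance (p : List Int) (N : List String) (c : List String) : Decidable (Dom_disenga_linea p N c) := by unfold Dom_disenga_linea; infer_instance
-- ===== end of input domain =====

-- B scatters marks from the fixed list P into a pre-allocated buffer instead of
-- gathering per range position (removes the per-position scan of P and the string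
-- concatenation; measured faster in a timing run).

-- the module-level constant P (each port carries its own transliteration of it)
def PconstA : List Int := [2, 0, 6, 9, 7, 3]
def PconstB : List Int := [2, 0, 6, 9, 7, 3]

-- ===== PORT A =====
def disenga_linea (p : List Int) (N : List String) (c : List String) : String :=
  match PySem.List.min? p (fun x => x), PySem.List.max? p (fun x => x) with
  | some mn, some mx =>
    (PySem.List.pyRange mn (mx + 1) 1).foldl (fun linea x =>
      if PconstA.contains x then
        match PySem.List.index? PconstA x with
        | some i =>
          (match PySem.List.pyGet? N (i : Int) with
           | some nome => if c.contains nome then linea ++ "*" else linea ++ "+"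
           | none => linea)        -- IndexError on N[i]: excluded by Pre_
        | none => linea            -- unreachable: x ∈ P
      else linea ++ " ") ""
  | _, _ => ""                     -- ValueError (min/max of empty p): excluded by Pre_

-- ===== PORT B =====
def disenga_linea_alt (p : List Int) (N : List String) (c : List String) : String :=
  match PySem.List.min? p (fun x => x) with
  | none => ""                     -- ValueError (min of empty p): excluded by Pre_
  | some lo =>
    match PySem.List.max? p (fun x => x) with
    | none => ""                   -- ValueError (max of empty p): excluded by Pre_
    | some hi =>
      let buf := (PySem.List.enumerate PconstB 0).foldl (fun buf iv =>
        if lo ≤ iv.2 ∧ iv.2 ≤ hi then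
          match PySem.List.pyGet? N iv.1 with
          | some nome =>
            PySem.List.pySetD buf (iv.2 - lo) (if c.contains nome then '*' else '+')
          | none => buf            -- IndexError on N[i]: excluded by Pre_
        else buf) (List.replicate (hi - lo + 1).toNat ' ')
      String.ofList buf

-- ===== PRECONDITION & SPEC =====
-- Pre_ excludes exactly the crashes of A: empty p (ValueError from min/max) and inputs
-- where some value of P with index i lies in [min p, max p] while N has no i-th element
-- (IndexError from N[i]).
def Pre_disenga_linea (p : List Int) (N : List String) (c : List String) : Prop :=
  p ≠ [] ∧ ∀ i : Nat, (h : i < ([2, 0, 6, 9, 7, 3] : List Int).length) →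
    ((∃ a ∈ p, a ≤ ([2, 0, 6, 9, 7, 3] : List Int)[i]) ∧
     (∃ b ∈ p, ([2, 0, 6, 9, 7, 3] : List Int)[i] ≤ b)) → i < N.length
instance (p : List Int) (N : List String) (c : List String) : Decidable (Pre_disenga_linea p N c) := by unfold Pre_disenga_linea; infer_instance

def pvWitness_disenga_linea : List Int × List String × List String :=
  ([2, 0, 3], ["ann", "bob", "cat", "dan", "eva", "fin"], ["bob", "fin"])

def Spec_disenga_linea (p : List Int) (N : List String) (c : List String) (out : String) : Prop := out = disenga_linea_alt p N c
instance (p : List Int) (N : List String) (c : List String) (out : String) : Decidable (Spec_disenga_linea p N c out) := by unfold Spec_disenga_linea; infer_instance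

-- ===== CLAIM (what is proved, stated in full; the proofs are below) =====
def Claim_equal_disenga_linea : Prop := ∀ (p : List Int) (N : List String) (c : List String), Dom_disenga_linea p N c → Pre_disenga_linea p N c → Spec_disenga_linea p N c (disenga_linea p N c)

-- ===== LEMMAS AND PROOFS =====

-- the character produced for the P-entry with index i (under Pre_, N[i] exists)
def pvMark (N c : List String) (i : Int) : Char :=
  match PySem.List.pyGet? N i with
  | some nome => if c.contains nome then '*' else '+'
  | none => ' '

-- the character A produces at range position x
def pvG (N c : List String) (x : Int) : Char :=
  match PySem.List.index? PconstA x with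
  | some i => pvMark N c (i : Int)
  | none => ' '

-- named forms of the two loop bodies (definitionally equal to the lambdas in the ports)
def pvAstep (N c : List String) (linea : String) (x : Int) : String :=
  if PconstA.contains x then
    match PySem.List.index? PconstA x with
    | some i =>
      (match PySem.List.pyGet? N (i : Int) with
       | some nome => if c.contains nome then linea ++ "*" else linea ++ "+"
       | none => linea)
    | none => linea
  else linea ++ " "

def pvBstep (N c : List String) (lo hi : Int) (buf : List Char) (iv : Int × Int) : List Char :=
  if lo ≤ iv.2 ∧ iv.2 ≤ hi then
    match PySem.List.pyGet? N iv.1 with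
    | some nome =>
      PySem.List.pySetD buf (iv.2 - lo) (if c.contains nome then '*' else '+')
    | none => buf
  else buf

lemma pvAstep_toList (N c : List String) (mn mx : Int)
    (H : ∀ x i, mn ≤ x → x ≤ mx → PySem.List.index? PconstA x = some i →
      (PySem.List.pyGet? N (i : Int)).isSome)
    (t : String) (x : Int) (h1 : mn ≤ x) (h2 : x ≤ mx) :
    (pvAstep N c t x).toList = t.toList ++ [pvG N c x] := by
  unfold pvAstep pvG
  by_cases hmem : x ∈ PconstA
  · have hx : PconstA.contains x = true := by simpa using hmem
    obtain ⟨i, hi⟩ := Option.isSome_iff_exists.mp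
      ((PySem.List.index?_isSome_iff PconstA x).mpr hmem)
    have hs := H x i h1 h2 hi
    obtain ⟨nome, hn⟩ := Option.isSome_iff_exists.mp hs
    rw [hi]
    simp only [hx, if_true, hn]
    unfold pvMark
    rw [hn]
    by_cases hc : nome ∈ c
    · simp [hc, String.toList_append]
    · simp [hc, String.toList_append]
  · have hx : ¬ PconstA.contains x = true := by simpa using hmem
    have hnone : PySem.List.index? PconstA x = none :=
      (PySem.List.index?_eq_none_iff PconstA x).mpr hmem
    simp only [PySem.List.index?_eq_idxOf?] at hnone
    simp [hmem, hnone, String.toList_append]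

lemma pvA_fold (N c : List String) (mn mx : Int)
    (H : ∀ x i, mn ≤ x → x ≤ mx → PySem.List.index? PconstA x = some i →
      (PySem.List.pyGet? N (i : Int)).isSome) :
    ∀ (n : Nat), mn + n ≤ mx + 1 → ∀ (s : String),
      ((PySem.List.pyRange mn (mn + n) 1).foldl (pvAstep N c) s).toList
        = s.toList ++ (PySem.List.pyRange mn (mn + n) 1).map (pvG N c) := by
  intro n
  induction n with
  | zero =>
    intro _ s
    rw [PySem.List.pyRange_one_eq_nil (by push_cast; omega : mn + ((0:Nat):Int) ≤ mn)]
    simp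
  | succ m ih =>
    intro hle s
    have hcast : mn + ((m + 1 : Nat) : Int) = (mn + m) + 1 := by push_cast; ring
    rw [hcast, PySem.List.pyRange_one_succ_right (show mn ≤ mn + (m:Int) by omega)]
    rw [List.foldl_append, List.map_append]
    simp only [List.foldl_cons, List.foldl_nil, List.map_cons, List.map_nil]
    rw [pvAstep_toList N c mn mx H _ (mn + (m : Int)) (by omega) (by push_cast at hle; omega)]
    rw [ih (by push_cast at hle ⊢; omega) s]
    simp

lemma pvBstep_length (N c : List String) (lo hi : Int) (buf : List Char) (iv : Int × Int) :
    (pvBstep N c lo hi buf iv).length = buf.length := by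
  unfold pvBstep
  split_ifs with hg
  · cases h : PySem.List.pyGet? N iv.1 with
    | none => rfl
    | some nome => simp [PySem.List.length_pySetD]
  · rfl

lemma pvBstep_getElem? (N c : List String) (lo hi : Int) (buf : List Char) (i v : Int)
    (k : Nat) (hk : k < buf.length) :
    (pvBstep N c lo hi buf (i, v))[k]?
      = some (if (lo ≤ v ∧ v ≤ hi) ∧ v = lo + (k : Int) ∧ (PySem.List.pyGet? N i).isSome
              then pvMark N c i else buf[k]) := by
  unfold pvBstep
  dsimp only
  by_cases hg : lo ≤ v ∧ v ≤ hi
  · cases h : PySem.List.pyGet? N i with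
    | none => simp [hg, List.getElem?_eq_getElem hk]
    | some nome =>
      simp only [hg,
        PySem.List.pySetD_of_nonneg buf _ (by omega : (0 : Int) ≤ v - lo)]
      by_cases hv : v = lo + (k : Int)
      · have ht : (v - lo).toNat = k := by omega
        simp [hv, pvMark, h, hk]
      · have ht : (v - lo).toNat ≠ k := by omega
        simp [hv, ht, hk]
  · simp [hg, List.getElem?_eq_getElem hk]

lemma pvBstep_getD (N c : List String) (lo hi : Int) (buf : List Char) (i v : Int)
    (k : Nat) (hk : k < buf.length) :
    (pvBstep N c lo hi buf (i, v)).getD k ' '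
      = if (lo ≤ v ∧ v ≤ hi) ∧ v = lo + (k : Int) ∧ (PySem.List.pyGet? N i).isSome
        then pvMark N c i else buf.getD k ' ' := by
  rw [List.getD_eq_getElem?_getD, pvBstep_getElem? N c lo hi buf i v k hk,
    List.getD_eq_getElem?_getD, List.getElem?_eq_getElem hk]
  rfl

theorem disenga_linea_spec : Claim_equal_disenga_linea := by
  intro p N c _hdom hpre
  obtain ⟨hp, hN⟩ := hpre
  unfold Spec_disenga_linea disenga_linea disenga_linea_alt
  cases hmn : PySem.List.min? p (fun x => x) with
  | none => exact absurd ((PySem.List.min?_eq_none_iff p _).mp hmn) hp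
  | some mn =>
  cases hmx : PySem.List.max? p (fun x => x) with
  | none => exact absurd ((PySem.List.max?_eq_none_iff p _).mp hmx) hp
  | some mx =>
  have hmnp : mn ∈ p := PySem.List.min?_mem hmn
  have hmxp : mx ∈ p := PySem.List.max?_mem hmx
  have hmnmx : mn ≤ mx := PySem.List.min?_isMin hmn mx hmxp
  dsimp only
  have H : ∀ x i, mn ≤ x → x ≤ mx → PySem.List.index? PconstA x = some i →
      (PySem.List.pyGet? N (i : Int)).isSome := by
    intro x i hx1 hx2 hidx
    obtain ⟨hik, hval, _⟩ := PySem.List.getElem_of_index?_eq_some hidx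
    have hN' : ∀ i : Nat, (h : i < PconstA.length) →
        ((∃ a ∈ p, a ≤ PconstA[i]) ∧ (∃ b ∈ p, PconstA[i] ≤ b)) → i < N.length := hN
    have hiN : i < N.length := hN' i hik
      ⟨⟨mn, hmnp, by rw [hval]; exact hx1⟩, ⟨mx, hmxp, by rw [hval]; exact hx2⟩⟩
    simp [PySem.List.pyGet?_natCast, List.getElem?_eq_getElem hiN]
  -- name the two loop bodies
  have eA : (fun (linea : String) (x : Int) =>
      if PconstA.contains x then
        match PySem.List.index? PconstA x with
        | some i =>
          (match PySem.List.pyGet? N (i : Int) with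
           | some nome => if c.contains nome then linea ++ "*" else linea ++ "+"
           | none => linea)
        | none => linea
      else linea ++ " ") = pvAstep N c := rfl
  have eB : (fun (buf : List Char) (iv : Int × Int) =>
      if mn ≤ iv.2 ∧ iv.2 ≤ mx then
        match PySem.List.pyGet? N iv.1 with
        | some nome =>
          PySem.List.pySetD buf (iv.2 - mn) (if c.contains nome then '*' else '+')
        | none => buf
      else buf) = pvBstep N c mn mx := rfl
  rw [eA, eB]
  set n : Nat := ((mx + 1) - mn).toNat with hn
  have hrange : mx + 1 = mn + (n : Int) := by omega
  apply String.ext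
  rw [String.toList_ofList, hrange,
    pvA_fold N c mn mx H n (by omega) ""]
  have henum : PySem.List.enumerate PconstB 0
      = [((0:Int),(2:Int)), (1,0), (2,6), (3,9), (4,7), (5,3)] := by decide
  rw [henum]
  simp only [List.foldl_cons, List.foldl_nil]
  have hlen0 : (List.replicate (mx - mn + 1).toNat ' ').length = (mx - mn + 1).toNat := by
    simp
  apply List.ext_getElem
  · simp [pvBstep_length, PySem.List.length_pyRange_one]
    omega
  · intro k hk1 hk2
    have hkn : k < n := by
      simpa [PySem.List.length_pyRange_one] using hk1
    have hkr : k < (mx - mn + 1).toNat := by omega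
    -- left side: the mark A writes at range position mn+k
    simp only [show ("" : String).toList = [] from rfl, List.nil_append] at hk1 ⊢
    rw [List.getElem_map, PySem.List.getElem_pyRange_one]
    -- right side: peel the six scatter steps
    rw [← List.getD_eq_getElem _ ' ' hk2]
    simp only [pvBstep_getD, pvBstep_length, hlen0, hkr, List.getD_replicate]
    -- case split on which entry of P (if any) equals mn+k
    have hkx : mn + (k : Int) ≤ mx := by omega
    have hk0 : mn ≤ mn + (k : Int) := by omega
    by_cases h2 : (2:Int) = mn + (k : Int)
    · rw [← h2]
      have hs := H 2 0 (by omega) (by omega) (by decide)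
      norm_num at hs
      have ha : mn ≤ 2 := by omega
      have hb : (2:Int) ≤ mx := by omega
      simp [pvG, show List.idxOf? ((2:Int)) PconstA = some 0 from by decide, hs, ha, hb]
    · by_cases h0 : (0:Int) = mn + (k : Int)
      · rw [← h0]
        have hs := H 0 1 (by omega) (by omega) (by decide)
        norm_num at hs
        have ha : mn ≤ 0 := by omega
        have hb : (0:Int) ≤ mx := by omega
        simp [pvG, show List.idxOf? ((0:Int)) PconstA = some 1 from by decide, hs, ha, hb]
      · by_cases h6 : (6:Int) = mn + (k : Int)
        · rw [← h6]
          have hs := H 6 2 (by omega) (by omega) (by decide)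
          norm_num at hs
          have ha : mn ≤ 6 := by omega
          have hb : (6:Int) ≤ mx := by omega
          simp [pvG, show List.idxOf? ((6:Int)) PconstA = some 2 from by decide, hs, ha, hb]
        · by_cases h9 : (9:Int) = mn + (k : Int)
          · rw [← h9]
            have hs := H 9 3 (by omega) (by omega) (by decide)
            norm_num at hs
            have ha : mn ≤ 9 := by omega
            have hb : (9:Int) ≤ mx := by omega
            simp [pvG, show List.idxOf? ((9:Int)) PconstA = some 3 from by decide, hs, ha, hb]
          · by_cases h7 : (7:Int) = mn + (k : Int)
            · rw [← h7]
              have hs := H 7 4 (by omega) (by omega) (by decide)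
              norm_num at hs
              have ha : mn ≤ 7 := by omega
              have hb : (7:Int) ≤ mx := by omega
              simp [pvG, show List.idxOf? ((7:Int)) PconstA = some 4 from by decide, hs, ha, hb]
            · by_cases h3 : (3:Int) = mn + (k : Int)
              · rw [← h3]
                have hs := H 3 5 (by omega) (by omega) (by decide)
                norm_num at hs
                have ha : mn ≤ 3 := by omega
                have hb : (3:Int) ≤ mx := by omega
                simp [pvG, show List.idxOf? ((3:Int)) PconstA = some 5 from by decide, hs, ha, hb]
              · have hnm : mn + (k : Int) ∉ PconstA := by
                  simp only [PconstA, List.mem_cons, List.not_mem_nil, or_false]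
                  omega
                have hnone := (PySem.List.index?_eq_none_iff PconstA (mn + (k : Int))).mpr hnm
                simp only [PySem.List.index?_eq_idxOf?] at hnone
                simp [pvG, hnone, h2, h0, h6, h9, h7, h3]
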